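-- pv_equiv track=rewrite | github.com/alexandraback/datacollection | solutions_5738606668808192_1/Python/thecy18/C.py | get_num
-- ===== SOURCE A (Python) =====
-- N = 32
--
-- def get_num(k, base):
--     num = 1
--     fac = base
--     kk = k
--     while kk != 0:
--         num += (kk % 2)*fac
--         kk //= 2
--         fac *= base
--     num += base**(N-1)
--     return num
-- ===== SOURCE B (Python) =====
-- N = 32
--
-- def get_num(k, base):
--     # collect bits LSB-first (same raw extraction as A, so negative k loops forever identically)
--     bits = []
--     kk = k
--     while kk != 0:
--         bits.append(kk % 2)
--         kk //= 2
--     # Horner evaluation from most-significant bit down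
--     value = 0
--     for bit in reversed(bits):
--         value = value * base + bit
--     return 1 + base * value + base ** (N - 1)
-- ===== Notes on version B (the rewrite author's own statement) =====
-- stated objective: alternative
-- what changed: B splits A's single loop (which maintains a running power fac) into a bit-collection pass followed by a Horner-scheme fold over the bits from most- to least-significant, maintaining an accumulated value instead of a power.
import Mathlib
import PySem

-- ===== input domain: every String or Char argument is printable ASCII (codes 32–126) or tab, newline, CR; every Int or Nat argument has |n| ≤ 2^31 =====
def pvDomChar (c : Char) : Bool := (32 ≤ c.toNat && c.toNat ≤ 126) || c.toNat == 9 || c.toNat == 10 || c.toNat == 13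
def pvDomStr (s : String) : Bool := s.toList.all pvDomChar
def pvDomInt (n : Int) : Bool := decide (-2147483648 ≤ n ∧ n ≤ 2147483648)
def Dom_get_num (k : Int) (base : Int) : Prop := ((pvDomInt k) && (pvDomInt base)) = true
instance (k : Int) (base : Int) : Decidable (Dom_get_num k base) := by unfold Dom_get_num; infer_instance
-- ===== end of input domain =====

-- B replaces A's running-power loop by a bit-collection pass plus a Horner fold (alternative decomposition, same cost).


-- ===== PORT A =====
-- A's while loop, step for step; the structural fuel argument (|k|+1, strictly decreasing
-- per iteration) only makes the recursion total: for k ≥ 0 the loop exits at kk = 0 before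
-- fuel runs out, and for k < 0 Python's floor-division loop never terminates (outside Pre_).
def getNumLoopA : Nat → Int → Int → Int → Int → Int
  | 0, _, num, _, _ => num
  | fuel + 1, kk, num, fac, base =>
    if kk = 0 then num
    else getNumLoopA fuel (PySem.Int.floordiv kk 2) (num + (PySem.Int.mod kk 2) * fac) (fac * base) base

def get_num (k : Int) (base : Int) : Int :=
  getNumLoopA (k.natAbs + 1) k 1 base base + base ^ (31 : ℕ)

-- ===== PORT B =====
-- bit-collection pass of Source B (same raw kk //= 2 extraction; fuel as above, for totality only)
def collectBits : Nat → Int → List Int → List Int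
  | 0, _, acc => acc
  | fuel + 1, kk, acc =>
    if kk = 0 then acc
    else collectBits fuel (PySem.Int.floordiv kk 2) (acc ++ [PySem.Int.mod kk 2])

def get_num_alt (k : Int) (base : Int) : Int :=
  let bits := collectBits (k.natAbs + 1) k []
  let value := bits.reverse.foldl (fun v b => v * base + b) 0
  1 + base * value + base ^ (31 : ℕ)

-- ===== PRECONDITION & SPEC =====
-- no Pre_: the two ports agree on every input (for k < 0 both Pythons loop forever
-- identically, so no return value exists there to claim anything about)
def Spec_get_num (k : Int) (base : Int) (out : Int) : Prop := out = get_num_alt k base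
instance (k : Int) (base : Int) (out : Int) : Decidable (Spec_get_num k base out) := by unfold Spec_get_num; infer_instance

-- ===== CLAIM (what is proved, stated in full; the proofs are below) =====
def Claim_equal_get_num : Prop := ∀ (k : Int) (base : Int), Dom_get_num k base → Spec_get_num k base (get_num k base)

-- ===== LEMMAS AND PROOFS =====

-- the LSB-first bit list both loops produce under a given fuel (proof helper)
def bitsF : Nat → Int → List Int
  | 0, _ => []
  | fuel + 1, kk =>
    if kk = 0 then []
    else PySem.Int.mod kk 2 :: bitsF fuel (PySem.Int.floordiv kk 2)

-- LSB-first polynomial evaluation of a bit list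
def evalBits (base : Int) (l : List Int) : Int := l.foldr (fun b v => b + base * v) 0

theorem loopA_eq_eval (fuel : Nat) (kk num fac base : Int) :
    getNumLoopA fuel kk num fac base = num + fac * evalBits base (bitsF fuel kk) := by
  induction fuel generalizing kk num fac with
  | zero => simp [getNumLoopA, bitsF, evalBits]
  | succ f ih =>
      rw [getNumLoopA, bitsF]
      by_cases h : kk = 0
      · simp [h, evalBits]
      · simp only [h, if_false]
        rw [ih]
        simp only [evalBits, List.foldr_cons]
        ring

theorem collectBits_eq (fuel : Nat) (kk : Int) (acc : List Int) :
    collectBits fuel kk acc = acc ++ bitsF fuel kk := by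
  induction fuel generalizing kk acc with
  | zero => simp [collectBits, bitsF]
  | succ f ih =>
      rw [collectBits, bitsF]
      by_cases h : kk = 0
      · simp [h]
      · simp only [h, if_false]
        rw [ih]
        simp

theorem foldl_reverse_horner (base : Int) (l : List Int) :
    l.reverse.foldl (fun v b => v * base + b) 0 = evalBits base l := by
  rw [List.foldl_reverse]
  induction l with
  | nil => rfl
  | cons b t ih =>
      simp only [evalBits, List.foldr_cons] at ih ⊢
      rw [ih]; ring

-- ===== VERDICT (by name: the statement is the Claim_ definition above) =====
theorem get_num_spec : Claim_equal_get_num := by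
  intro k base _
  unfold Spec_get_num get_num get_num_alt
  simp only [loopA_eq_eval, collectBits_eq, List.nil_append, foldl_reverse_horner]
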